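-- pv_equiv track=rewrite | github.com/AndiSsS/UniversityTests | defs.py | _get_first_number_from_str
-- ===== SOURCE A (Python) =====
-- def _get_first_number_from_str(input_str):
--     result = ""
--
--     for s in input_str:
--         if not s.isdigit():
--             input_str = input_str[1:]
--         else:
--             break
--
--     for s in input_str:
--         if s.isdigit() or s == ".":
--             result += s
--         else:
--             break
--     return result
-- ===== SOURCE B (Python) =====
-- def _get_first_number_from_str(input_str):
--     n = len(input_str)
--     i = 0
--     while i < n and not input_str[i].isdigit():
--         i += 1
--     result = []
--     while i < n and (input_str[i].isdigit() or input_str[i] == "."):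
--         result.append(input_str[i])
--         i += 1
--     return "".join(result)
-- ===== Notes on version B (the rewrite author's own statement) =====
-- stated objective: faster
-- what changed: Replaces A's repeated input_str[1:] slicing (quadratic prefix stripping) and string concatenation with a single forward index scan that finds the first digit and then collects the digit/dot run into a list joined once.
import Mathlib
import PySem

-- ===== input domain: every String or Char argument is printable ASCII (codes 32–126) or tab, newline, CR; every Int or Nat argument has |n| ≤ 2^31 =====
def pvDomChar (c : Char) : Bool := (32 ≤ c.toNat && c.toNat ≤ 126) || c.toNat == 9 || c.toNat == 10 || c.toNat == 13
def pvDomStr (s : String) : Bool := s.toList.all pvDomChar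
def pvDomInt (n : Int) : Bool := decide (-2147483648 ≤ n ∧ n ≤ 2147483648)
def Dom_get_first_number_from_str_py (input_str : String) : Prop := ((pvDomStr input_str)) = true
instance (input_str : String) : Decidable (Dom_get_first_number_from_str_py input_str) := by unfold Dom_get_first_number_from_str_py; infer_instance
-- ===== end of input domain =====

-- B replaces A's repeated `input_str[1:]` slicing with one forward index scan (faster).

-- ===== PORT A =====
-- first loop: iterate over the ORIGINAL string's chars; on a non-digit drop the
-- current string's first char, on a digit break
def pvADrop : List Char → List Char → List Char
  | [], cur => cur
  | c :: rest, cur => if !(PySem.Chars.isdigit c) then pvADrop rest (cur.drop 1) else cur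

-- second loop: accumulate digits and dots into result, break at the first other char
def pvATake : List Char → List Char → List Char
  | [], res => res
  | c :: rest, res =>
      if PySem.Chars.isdigit c || c == '.' then pvATake rest (res ++ [c]) else res

def get_first_number_from_str_py (input_str : String) : String :=
  let cs := input_str.toList
  String.mk (pvATake (pvADrop cs cs) [])

-- ===== PORT B =====
-- first while loop of Source B: advance i past non-digits
def pvBScan1 (s : List Char) (i : Nat) : Nat :=
  if h : i < s.length then
    if !(PySem.Chars.isdigit s[i]) then pvBScan1 s (i + 1) else i
  else i
termination_by s.length - i

-- second while loop of Source B: append the digit/dot run starting at i to result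
def pvBScan2 (s : List Char) (i : Nat) (result : List Char) : List Char :=
  if h : i < s.length then
    if PySem.Chars.isdigit s[i] || s[i] == '.' then pvBScan2 s (i + 1) (result ++ [s[i]]) else result
  else result
termination_by s.length - i

def get_first_number_from_str_py_alt (input_str : String) : String :=
  let cs := input_str.toList
  String.mk (pvBScan2 cs (pvBScan1 cs 0) [])

-- ===== PRECONDITION & SPEC =====
def Spec_get_first_number_from_str_py (input_str : String) (out : String) : Prop := out = get_first_number_from_str_py_alt input_str
instance (input_str : String) (out : String) : Decidable (Spec_get_first_number_from_str_py input_str out) := by unfold Spec_get_first_number_from_str_py; infer_instance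

-- ===== CLAIM (what is proved, stated in full; the proofs are below) =====
def Claim_equal_get_first_number_from_str_py : Prop := ∀ (input_str : String), Dom_get_first_number_from_str_py input_str → Spec_get_first_number_from_str_py input_str (get_first_number_from_str_py input_str)

-- ===== LEMMAS AND PROOFS =====

lemma pvADrop_self (l : List Char) :
    pvADrop l l = l.dropWhile (fun c => !(PySem.Chars.isdigit c)) := by
  induction l with
  | nil => rfl
  | cons c rest ih =>
      simp only [pvADrop, List.dropWhile]
      by_cases h : PySem.Chars.isdigit c
      · simp [h]
      · simp [h, ih]

lemma pvATake_eq (l res : List Char) :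
    pvATake l res = res ++ l.takeWhile (fun c => PySem.Chars.isdigit c || c == '.') := by
  induction l generalizing res with
  | nil => simp [pvATake]
  | cons c rest ih =>
      simp only [pvATake, List.takeWhile]
      by_cases h : (PySem.Chars.isdigit c || c == '.') = true
      · simp [h, ih]
      · simp [h]

lemma pvBScan1_drop (s : List Char) (i : Nat) :
    s.drop (pvBScan1 s i) = (s.drop i).dropWhile (fun c => !(PySem.Chars.isdigit c)) := by
  rw [pvBScan1]
  by_cases h : i < s.length
  · rw [List.drop_eq_getElem_cons h, List.dropWhile]
    by_cases hd : PySem.Chars.isdigit s[i]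
    · simp [h, hd]
    · simp only [h, hd, dif_pos, Bool.not_false, if_pos]
      simp [pvBScan1_drop s (i + 1)]
  · simp [h, List.drop_eq_nil_of_le (le_of_not_gt h)]
termination_by s.length - i

lemma pvBScan2_eq (s : List Char) (i : Nat) (res : List Char) :
    pvBScan2 s i res = res ++ (s.drop i).takeWhile (fun c => PySem.Chars.isdigit c || c == '.') := by
  rw [pvBScan2]
  by_cases h : i < s.length
  · rw [List.drop_eq_getElem_cons h, List.takeWhile]
    by_cases hp : (PySem.Chars.isdigit s[i] || s[i] == '.') = true
    · simp only [h, hp, dif_pos, if_pos]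
      simp [pvBScan2_eq s (i + 1) (res ++ [s[i]])]
    · simp [h, hp]
  · simp [h, List.drop_eq_nil_of_le (le_of_not_gt h)]
termination_by s.length - i

-- ===== VERDICT (by name: the statement is the Claim_ definition above) =====
theorem get_first_number_from_str_py_spec : Claim_equal_get_first_number_from_str_py := by
  intro input_str _
  unfold Spec_get_first_number_from_str_py
  simp only [get_first_number_from_str_py, get_first_number_from_str_py_alt,
    pvADrop_self, pvATake_eq, pvBScan2_eq, pvBScan1_drop, List.drop_zero, List.nil_append]
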